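-- pv_equiv track=rewrite | github.com/Lucky472/Kalm | ClientH.py | detect_clicked_square
-- ===== SOURCE A (Python) =====
-- Y_AXIS_LENGTH = 7
--
-- X_AXIS_LENGTH = 7
--
-- SIZESQUARE = 50
--
-- WIDTHLINE = 4
--
-- X_OFFSET = 10
--
-- Y_OFFSET = 10
--
-- def detect_clicked_square(pixel_x,pixel_y):
--     for x in range(0,X_AXIS_LENGTH):
--         x_minus = x*SIZESQUARE + X_OFFSET + WIDTHLINE
--         x_maxus = (x+1)*SIZESQUARE + X_OFFSET - WIDTHLINE
--         for y in range(0,Y_AXIS_LENGTH):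
--             y_minus = y*SIZESQUARE + Y_OFFSET + WIDTHLINE
--             y_maxus = (y+1)*SIZESQUARE + Y_OFFSET - WIDTHLINE
--             if (pixel_x >= x_minus) and (pixel_x <= x_maxus):
--                 if (pixel_y >= y_minus) and (pixel_y <= y_maxus):
--                     return (2*x,2*y)
-- ===== SOURCE B (Python) =====
-- Y_AXIS_LENGTH = 7
--
-- X_AXIS_LENGTH = 7
--
-- SIZESQUARE = 50
--
-- WIDTHLINE = 4
--
-- X_OFFSET = 10
--
-- Y_OFFSET = 10
--
-- def detect_clicked_square(pixel_x, pixel_y):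
--     gx = (pixel_x - X_OFFSET - WIDTHLINE) // SIZESQUARE
--     rx = (pixel_x - X_OFFSET - WIDTHLINE) % SIZESQUARE
--     gy = (pixel_y - Y_OFFSET - WIDTHLINE) // SIZESQUARE
--     ry = (pixel_y - Y_OFFSET - WIDTHLINE) % SIZESQUARE
--     if 0 <= gx < X_AXIS_LENGTH and rx <= SIZESQUARE - 2 * WIDTHLINE \
--             and 0 <= gy < Y_AXIS_LENGTH and ry <= SIZESQUARE - 2 * WIDTHLINE:
--         return (2 * gx, 2 * gy)
--     return None
-- ===== Notes on version B (the rewrite author's own statement) =====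
-- stated objective: simpler
-- what changed: Replaced the 7x7 nested scan over all grid squares with direct floor division to get the candidate grid cell plus a remainder check that rejects pixels in the gaps between squares and out-of-range indices.
import Mathlib
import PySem

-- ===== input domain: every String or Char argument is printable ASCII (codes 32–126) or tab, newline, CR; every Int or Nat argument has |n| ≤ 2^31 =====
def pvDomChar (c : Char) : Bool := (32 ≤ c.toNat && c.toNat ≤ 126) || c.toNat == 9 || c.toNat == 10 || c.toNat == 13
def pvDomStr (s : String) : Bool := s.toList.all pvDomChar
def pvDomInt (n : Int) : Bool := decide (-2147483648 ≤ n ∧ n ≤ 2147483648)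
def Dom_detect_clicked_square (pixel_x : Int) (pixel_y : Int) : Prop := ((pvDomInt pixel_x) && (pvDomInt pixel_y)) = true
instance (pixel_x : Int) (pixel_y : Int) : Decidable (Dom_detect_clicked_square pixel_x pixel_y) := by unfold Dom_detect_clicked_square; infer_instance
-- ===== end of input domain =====

-- B replaces A's 7×7 search loop with direct integer division plus a gap check (simpler, constant work per call).

-- ===== PORT A =====
-- A: scan x in range(7), y in range(7); the first (x, y) whose square contains the pixel wins; implicit None.
def detect_clicked_square (pixel_x : Int) (pixel_y : Int) : Option (Int × Int) :=
  (PySem.List.pyRange 0 7 1).findSome? (fun x =>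
    let x_minus := x * 50 + 10 + 4
    let x_maxus := (x + 1) * 50 + 10 - 4
    (PySem.List.pyRange 0 7 1).findSome? (fun y =>
      let y_minus := y * 50 + 10 + 4
      let y_maxus := (y + 1) * 50 + 10 - 4
      if pixel_x ≥ x_minus ∧ pixel_x ≤ x_maxus then
        if pixel_y ≥ y_minus ∧ pixel_y ≤ y_maxus then some (2 * x, 2 * y)
        else none
      else none))

-- ===== PORT B =====
-- B: grid index by floor division; reject out-of-range indices and pixels in the gaps between squares.
def detect_clicked_square_alt (pixel_x : Int) (pixel_y : Int) : Option (Int × Int) :=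
  let gx := PySem.Int.floordiv (pixel_x - 10 - 4) 50
  let rx := PySem.Int.mod (pixel_x - 10 - 4) 50
  let gy := PySem.Int.floordiv (pixel_y - 10 - 4) 50
  let ry := PySem.Int.mod (pixel_y - 10 - 4) 50
  if 0 ≤ gx ∧ gx < 7 ∧ rx ≤ 50 - 2 * 4 ∧ 0 ≤ gy ∧ gy < 7 ∧ ry ≤ 50 - 2 * 4 then
    some (2 * gx, 2 * gy)
  else none

-- ===== PRECONDITION & SPEC =====
def Spec_detect_clicked_square (pixel_x : Int) (pixel_y : Int) (out : Option (Int × Int)) : Prop := out = detect_clicked_square_alt pixel_x pixel_y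
instance (pixel_x : Int) (pixel_y : Int) (out : Option (Int × Int)) : Decidable (Spec_detect_clicked_square pixel_x pixel_y out) := by unfold Spec_detect_clicked_square; infer_instance

-- ===== CLAIM (what is proved, stated in full; the proofs are below) =====
def Claim_equal_detect_clicked_square : Prop := ∀ (pixel_x : Int) (pixel_y : Int), Dom_detect_clicked_square pixel_x pixel_y → Spec_detect_clicked_square pixel_x pixel_y (detect_clicked_square pixel_x pixel_y)

-- ===== LEMMAS AND PROOFS =====

-- Hoist an ite whose condition does not depend on the element out of findSome?.
theorem findSome?_hoist {T : Type} (c : Prop) [Decidable c] (f : Int → Option T) (l : List Int) :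
    l.findSome? (fun y => if c then f y else none) = if c then l.findSome? f else none := by
  by_cases h : c <;> simp [h]

set_option maxHeartbeats 1000000 in
-- The first index x in [0..6] whose band [50x+14, 50x+56] contains p is exactly the
-- floor-division candidate q, accepted iff 0 ≤ q < 7 and the remainder r avoids the gap.
theorem findSome?_band {T : Type} (p q r : Int)
    (hq : q * 50 + r = p - 10 - 4) (h0 : 0 ≤ r) (h1 : r < 50) (g : Int → T) :
    ([0, 1, 2, 3, 4, 5, 6] : List Int).findSome?
      (fun x => if p ≥ x * 50 + 10 + 4 ∧ p ≤ (x + 1) * 50 + 10 - 4 then some (g x) else none)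
    = if 0 ≤ q ∧ q < 7 ∧ r ≤ 42 then some (g q) else none := by
  by_cases h : 0 ≤ q ∧ q < 7 ∧ r ≤ 42
  · rw [if_pos h]
    obtain ⟨h2, h3, h4⟩ := h
    interval_cases q <;>
      (simp only [List.findSome?_cons, List.findSome?_nil] <;>
       split_ifs <;> first | rfl | omega)
  · rw [if_neg h]
    simp only [List.findSome?_cons, List.findSome?_nil] <;>
      split_ifs <;> first | rfl | omega

theorem detect_clicked_square_eq (pixel_x pixel_y : Int) :
    detect_clicked_square pixel_x pixel_y = detect_clicked_square_alt pixel_x pixel_y := by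
  have hqx : PySem.Int.floordiv (pixel_x - 10 - 4) 50 * 50 + PySem.Int.mod (pixel_x - 10 - 4) 50 = pixel_x - 10 - 4 :=
    PySem.Int.floordiv_mul_add_mod _ _
  have hmx := PySem.Int.mod_eq_emod_of_pos (a := pixel_x - 10 - 4) (b := 50) (by norm_num)
  have hr0x : 0 ≤ PySem.Int.mod (pixel_x - 10 - 4) 50 := by
    rw [hmx]; exact Int.emod_nonneg _ (by norm_num)
  have hr1x : PySem.Int.mod (pixel_x - 10 - 4) 50 < 50 := by
    rw [hmx]; exact Int.emod_lt_of_pos _ (by norm_num)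
  have hqy : PySem.Int.floordiv (pixel_y - 10 - 4) 50 * 50 + PySem.Int.mod (pixel_y - 10 - 4) 50 = pixel_y - 10 - 4 :=
    PySem.Int.floordiv_mul_add_mod _ _
  have hmy := PySem.Int.mod_eq_emod_of_pos (a := pixel_y - 10 - 4) (b := 50) (by norm_num)
  have hr0y : 0 ≤ PySem.Int.mod (pixel_y - 10 - 4) 50 := by
    rw [hmy]; exact Int.emod_nonneg _ (by norm_num)
  have hr1y : PySem.Int.mod (pixel_y - 10 - 4) 50 < 50 := by
    rw [hmy]; exact Int.emod_lt_of_pos _ (by norm_num)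
  simp only [detect_clicked_square, detect_clicked_square_alt]
  rw [show PySem.List.pyRange 0 7 1 = [0, 1, 2, 3, 4, 5, 6] from by decide]
  generalize hQX : PySem.Int.floordiv (pixel_x - 10 - 4) 50 = qx at *
  generalize hRX : PySem.Int.mod (pixel_x - 10 - 4) 50 = rx at *
  generalize hQY : PySem.Int.floordiv (pixel_y - 10 - 4) 50 = qy at *
  generalize hRY : PySem.Int.mod (pixel_y - 10 - 4) 50 = ry at *
  simp only [findSome?_hoist, findSome?_band pixel_y qy ry hqy hr0y hr1y]
  by_cases hy : 0 ≤ qy ∧ qy < 7 ∧ ry ≤ 42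
  · simp only [if_pos hy]
    rw [findSome?_band pixel_x qx rx hqx hr0x hr1x (fun x => (2 * x, 2 * qy))]
    split_ifs <;> first | rfl | omega
  · simp only [if_neg hy]
    have : (fun (x : Int) => if pixel_x ≥ x * 50 + 10 + 4 ∧ pixel_x ≤ (x + 1) * 50 + 10 - 4 then (none : Option (Int × Int)) else none) = fun _ => none := by
      funext x; split_ifs <;> rfl
    rw [this]
    simp only [List.findSome?_cons, List.findSome?_nil]
    split_ifs <;> first | rfl | omega

-- ===== VERDICT (by name: the statement is the Claim_ definition above) =====
theorem detect_clicked_square_spec : Claim_equal_detect_clicked_square := by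
  intro px py _
  exact detect_clicked_square_eq px py
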